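-- pv_equiv track=rewrite | github.com/pypi-data/pypi-mirror-184 | packages/owl-parser/owl_parser-0.1.18-py3-none-any.whl/owl_parser/dmo/spacy_match_finder.py | _process
-- ===== SOURCE A (Python) =====
-- def _process(
--              tokens: list) -> list:
--
--     i = 0
--     master = []
--
--     max_len = len(tokens) - 1
--
--     while i < max_len:
--
--         token_curr = tokens[i]
--         curr_i = i
--
--         def curr_ent() -> bool:
--             if 'ent' not in token_curr:
--                 return False
--             if not token_curr['ent']:
--                 return False
--             return True
--
--         if not curr_ent():
--             i += 1
--             continue
--
--         token_next = tokens[i + 1]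
--         next_i = i + 1
--
--         def next_ent() -> bool:
--             if 'ent' not in token_next:
--                 return False
--             if not token_next['ent']:
--                 return False
--             return token_next['ent'] == token_curr['ent']
--
--         if not next_ent():
--             i += 1
--             continue
--
--         i += 2
--
--         buffer = {
--             curr_i: token_curr,
--             next_i: token_next
--         }
--
--         while i < len(tokens):
--
--             def is_match():
--                 if 'ent' not in tokens[i]:
--                     return False
--                 if not tokens[i]['ent']:
--                     return False
--                 return tokens[i]['ent'] == tokens[i - 1]['ent']
--
--             if is_match():
--                 buffer[i] = tokens[i]
--                 i += 1
--             else: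
--                 break
--
--         if len(buffer) > 1:
--             master.append(buffer)
--             # ----------------------------------------------------------
--             # Purpose:    Return First Match for Recursive Processing
--             # Reference:  https://github.com/grafflr/graffl-core/issues/96#issuecomment-954957907
--             # ----------------------------------------------------------
--             return master
--
--         buffer = []
--
--     return master
-- ===== SOURCE B (Python) =====
-- def _process(tokens: list) -> list:
--     def key(tok):
--         e = tok.get('ent')
--         return e if e else None  # None = never groups (missing/empty ent)
--
--     # split the enumerated tokens into maximal runs of consecutive equal truthy ents
--     pairs = list(enumerate(tokens))
--     groups = []
--     while pairs:
--         k = key(pairs[0][1])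
--         n = 1
--         while k is not None and n < len(pairs) and key(pairs[n][1]) == k:
--             n += 1
--         groups.append(pairs[:n])
--         pairs = pairs[n:]
--
--     # first run of length >= 2 is the answer
--     for g in groups:
--         if len(g) >= 2:
--             return [dict(g)]
--     return []
-- ===== Notes on version B (the rewrite author's own statement) =====
-- stated objective: idiomatic
-- what changed: Replaced A's index-driven 'detect a start pair, then extend with an inner while and early return' scan by a two-phase decomposition: split the enumerated tokens into maximal runs of consecutive equal truthy ents, then return the first run of length >= 2.
import Mathlib
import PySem

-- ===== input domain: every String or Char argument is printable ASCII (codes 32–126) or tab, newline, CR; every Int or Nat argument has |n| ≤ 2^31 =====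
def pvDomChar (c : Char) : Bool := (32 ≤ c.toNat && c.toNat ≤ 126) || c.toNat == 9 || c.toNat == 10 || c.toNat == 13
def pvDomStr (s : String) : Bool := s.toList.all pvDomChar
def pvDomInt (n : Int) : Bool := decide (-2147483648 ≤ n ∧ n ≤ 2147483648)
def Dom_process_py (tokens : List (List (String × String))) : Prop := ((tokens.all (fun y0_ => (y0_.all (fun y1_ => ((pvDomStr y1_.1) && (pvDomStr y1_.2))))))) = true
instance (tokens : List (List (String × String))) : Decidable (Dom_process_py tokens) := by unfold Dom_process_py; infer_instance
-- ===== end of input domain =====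

-- B replaces A's index-driven detect-start-pair-then-extend while loop by a two-phase
-- decomposition (split enumerated tokens into maximal runs of equal truthy ents, then take
-- the first run of length ≥ 2); same cost, more idiomatic.

-- ===== PORT A =====
def entGet (t : List (String × String)) : Option String :=
  (t.find? (fun p => p.1 == "ent")).map Prod.snd

-- curr_ent(): 'ent' present and truthy
def currEntA (t : List (String × String)) : Bool :=
  match entGet t with
  | none => false
  | some s => !(s == "")

-- next_ent(): 'ent' present, truthy, and equal to token_curr's
def nextEntA (tn tc : List (String × String)) : Bool :=
  match entGet tn with
  | none => false
  | some s => if s == "" then false else entGet tn == entGet tc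

-- is_match(): 'ent' present, truthy, and equal to previous token's ent
def isMatchA (t prev : List (String × String)) : Bool :=
  match entGet t with
  | none => false
  | some s => if s == "" then false else entGet t == entGet prev

-- inner `while i < len(tokens)` loop: extend the buffer while consecutive ents match
def extendA (i : Int) (prev : List (String × String)) (rest : List (List (String × String)))
    (buffer : List (Int × List (String × String))) :
    List (Int × List (String × String)) × Int × List (List (String × String)) :=
  match rest with
  | [] => (buffer, i, [])
  | t :: ts =>
    if isMatchA t prev then extendA (i + 1) t ts (buffer ++ [(i, t)])
    else (buffer, i, t :: ts)

theorem extendA_rest_le (i : Int) (prev : List (String × String))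
    (rest : List (List (String × String))) (buffer : List (Int × List (String × String))) :
    (extendA i prev rest buffer).2.2.length ≤ rest.length := by
  fun_induction extendA i prev rest buffer <;> simp_all
  omega

-- outer `while i < max_len` loop over the suffix of tokens starting at index i
def loopA (i : Int) (rest : List (List (String × String))) :
    List (List (Int × List (String × String))) :=
  match rest with
  | [] => []
  | [_] => []
  | tc :: tn :: ts =>
    if !currEntA tc then loopA (i + 1) (tn :: ts)
    else if !nextEntA tn tc then loopA (i + 1) (tn :: ts)
    else
      let r := extendA (i + 2) tn ts [(i, tc), (i + 1, tn)]
      if r.1.length > 1 then [r.1]       -- master.append(buffer); return master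
      else loopA r.2.1 r.2.2
termination_by rest.length
decreasing_by
  · simp
  · simp
  · have := extendA_rest_le (i + 2) tn ts [(i, tc), (i + 1, tn)]
    simp; omega

def process_py (tokens : List (List (String × String))) :
    List (List (Int × List (String × String))) := loopA 0 tokens

-- ===== PORT B =====
-- key(tok): ent when present and truthy, else None (which never groups)
def keyOf (t : List (String × String)) : Option String :=
  match (t.find? (fun p => p.1 == "ent")).map Prod.snd with
  | none => none
  | some s => if s == "" then none else some s

-- list(enumerate(tokens)) starting at index i
def enumP (i : Int) : List (List (String × String)) → List (Int × List (String × String))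
  | [] => []
  | t :: ts => (i, t) :: enumP (i + 1) ts

-- inner `while` of B: split off the pairs whose key equals k (none never groups)
def takeRun (k : Option String) :
    List (Int × List (String × String)) →
    List (Int × List (String × String)) × List (Int × List (String × String))
  | [] => ([], [])
  | x :: xs =>
    match k with
    | none => ([], x :: xs)
    | some s =>
      if keyOf x.2 == some s then
        ((x :: (takeRun (some s) xs).1), (takeRun (some s) xs).2)
      else ([], x :: xs)

theorem takeRun_rest_le (k : Option String) (xs : List (Int × List (String × String))) :
    (takeRun k xs).2.length ≤ xs.length := by
  fun_induction takeRun k xs <;> simp_all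
  omega

-- outer `while pairs:` of B: the list of maximal runs
def groupRuns : List (Int × List (String × String)) →
    List (List (Int × List (String × String)))
  | [] => []
  | x :: xs =>
    let r := takeRun (keyOf x.2) xs
    (x :: r.1) :: groupRuns r.2
termination_by xs => xs.length
decreasing_by
  have := takeRun_rest_le (keyOf x.2) xs
  simp; omega

-- final `for g in groups: if len(g) >= 2: return [dict(g)]`
def process_py_alt (tokens : List (List (String × String))) :
    List (List (Int × List (String × String))) :=
  match (groupRuns (enumP 0 tokens)).find? (fun g => decide (2 ≤ g.length)) with
  | some g => [g]
  | none => []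

-- ===== PRECONDITION & SPEC =====
def Spec_process_py (tokens : List (List (String × String))) (out : List (List (Int × List (String × String)))) : Prop := out = process_py_alt tokens
instance (tokens : List (List (String × String))) (out : List (List (Int × List (String × String)))) : Decidable (Spec_process_py tokens out) := by unfold Spec_process_py; infer_instance

-- ===== CLAIM (what is proved, stated in full; the proofs are below) =====
def Claim_equal_process_py : Prop := ∀ (tokens : List (List (String × String))), Dom_process_py tokens → Spec_process_py tokens (process_py tokens)

-- ===== LEMMAS AND PROOFS =====

-- keyOf, restated through A's accessor (same underlying expression)
theorem keyOf_eq (t : List (String × String)) :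
    keyOf t = (match entGet t with
               | none => none
               | some s => if s == "" then none else some s) := rfl

theorem keyOf_none_of_not_curr (t : List (String × String)) (h : currEntA t = false) :
    keyOf t = none := by
  rw [keyOf_eq]; unfold currEntA at h
  cases hg : entGet t with
  | none => simp
  | some s => simp [hg] at h; simp [h]

theorem curr_keyOf_some (t : List (String × String)) (h : currEntA t = true) :
    ∃ s, keyOf t = some s := by
  rw [keyOf_eq]; unfold currEntA at h
  cases hg : entGet t with
  | none => simp [hg] at h
  | some s => simp [hg] at h; exact ⟨s, by simp [h]⟩

theorem isMatch_eq_key (t prev : List (String × String)) (s : String)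
    (hp : keyOf prev = some s) : isMatchA t prev = (keyOf t == some s) := by
  have hprev : entGet prev = some s := by
    rw [keyOf_eq] at hp
    cases hg : entGet prev with
    | none => simp [hg] at hp
    | some s' =>
      simp [hg] at hp
      rcases hp with ⟨h1, h2⟩
      simp [h2]
  unfold isMatchA; rw [keyOf_eq]
  cases hg : entGet t with
  | none => simp
  | some s' =>
    by_cases hs : s' = ""
    · simp [hs]
    · simp [hs, hprev]

theorem nextEnt_eq_isMatch (tn tc : List (String × String)) :
    nextEntA tn tc = isMatchA tn tc := rfl

theorem enumP_cons (i : Int) (t : List (String × String))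
    (ts : List (List (String × String))) :
    enumP i (t :: ts) = (i, t) :: enumP (i + 1) ts := rfl

theorem takeRun_nil (k : Option String) :
    takeRun k [] = ([], []) := by
  cases k <;> simp [takeRun]

theorem takeRun_none (l : List (Int × List (String × String))) :
    takeRun none l = ([], l) := by
  cases l <;> simp [takeRun]

theorem takeRun_cons (s : String) (j : Int) (t : List (String × String))
    (xs : List (Int × List (String × String))) :
    takeRun (some s) ((j, t) :: xs)
      = if keyOf t == some s then
          ((j, t) :: (takeRun (some s) xs).1, (takeRun (some s) xs).2)
        else ([], (j, t) :: xs) := by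
  rw [takeRun]

theorem groupRuns_cons (j : Int) (t : List (String × String))
    (xs : List (Int × List (String × String))) :
    groupRuns ((j, t) :: xs)
      = ((j, t) :: (takeRun (keyOf t) xs).1) :: groupRuns (takeRun (keyOf t) xs).2 := by
  rw [groupRuns]

def findB (gs : List (List (Int × List (String × String)))) :
    List (List (Int × List (String × String))) :=
  match gs.find? (fun g => decide (2 ≤ g.length)) with
  | some g => [g]
  | none => []

theorem findB_short (g : List (Int × List (String × String)))
    (gs : List (List (Int × List (String × String)))) (h : g.length < 2) :
    findB (g :: gs) = findB gs := by
  simp [findB, List.find?, Nat.not_le.mpr h]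

theorem findB_long (g : List (Int × List (String × String)))
    (gs : List (List (Int × List (String × String)))) (h : 2 ≤ g.length) :
    findB (g :: gs) = [g] := by
  simp [findB, List.find?, h]

-- the inner loops agree: A's buffer extension is B's fixed-key run
theorem extend_buf (ts : List (List (String × String))) :
    ∀ (i : Int) (prev : List (String × String))
      (buf : List (Int × List (String × String))) (s : String),
      keyOf prev = some s →
      (extendA i prev ts buf).1 = buf ++ (takeRun (some s) (enumP i ts)).1 := by
  induction ts with
  | nil => intro i prev buf s _; simp [extendA, enumP, takeRun]
  | cons t ts ih =>
    intro i prev buf s hp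
    rw [enumP_cons, takeRun_cons]
    unfold extendA
    rw [isMatch_eq_key t prev s hp]
    by_cases hk : keyOf t = some s
    · simp [hk, ih (i + 1) t (buf ++ [(i, t)]) s hk]
    · simp [hk]

-- the outer loops agree on every suffix
theorem loop_eq (i : Int) (rest : List (List (String × String))) :
    loopA i rest = findB (groupRuns (enumP i rest)) := by
  fun_induction loopA i rest with
  | case1 i => simp [enumP, groupRuns, findB]
  | case2 i t =>
    have hnil : enumP (i + 1) [] = [] := rfl
    rw [enumP_cons, groupRuns_cons, hnil, takeRun_nil]
    simp [groupRuns, findB, List.find?]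
  | case3 i tc tn ts hc ih =>
    -- curr_ent() false: tc alone forms a singleton run
    rw [enumP_cons, groupRuns_cons, keyOf_none_of_not_curr tc (by simpa using hc),
        takeRun_none]
    rw [findB_short _ _ (by simp), ih]
  | case4 i tc tn ts hc hn ih =>
    -- next_ent() false: tc's run stops immediately
    have hc' : currEntA tc = true := by simpa using hc
    obtain ⟨s, hs⟩ := curr_keyOf_some tc hc'
    have hnm : isMatchA tn tc = false := by
      rw [← nextEnt_eq_isMatch]; simpa using hn
    have hkn : (keyOf tn == some s) = false := by
      rw [← isMatch_eq_key tn tc s hs]; exact hnm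
    rw [enumP_cons, groupRuns_cons, hs, enumP_cons, takeRun_cons, hkn]
    simp only [Bool.false_eq_true, ite_false]
    rw [findB_short _ _ (by simp), ih, enumP_cons]
  | case5 i tc tn ts hc hn r hlen =>
    -- a run starts at tc: A returns its buffer, B finds the same first long group
    have hc' : currEntA tc = true := by simpa using hc
    obtain ⟨s, hs⟩ := curr_keyOf_some tc hc'
    have hn' : isMatchA tn tc = true := by rw [← nextEnt_eq_isMatch]; simpa using hn
    have hkn : keyOf tn = some s := by
      have h := isMatch_eq_key tn tc s hs
      rw [hn'] at h; simpa using h.symm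
    have hbuf : r.1 = (i, tc) :: (i + 1, tn) :: (takeRun (some s) (enumP (i + 2) ts)).1 := by
      show (extendA (i + 2) tn ts [(i, tc), (i + 1, tn)]).1 = _
      rw [extend_buf ts (i + 2) tn [(i, tc), (i + 1, tn)] s hkn]; rfl
    rw [enumP_cons, groupRuns_cons, hs, enumP_cons, takeRun_cons]
    rw [show (keyOf tn == some s) = true by simp [hkn]]
    rw [if_pos rfl, findB_long _ _ (by simp)]
    rw [hbuf]
    have e2 : i + 1 + 1 = i + 2 := by ring
    rw [e2]
  | case6 i tc tn ts hc hn r hlen ih =>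
    -- unreachable: the buffer always holds at least the two starting tokens
    exfalso
    have hc' : currEntA tc = true := by simpa using hc
    obtain ⟨s, hs⟩ := curr_keyOf_some tc hc'
    have hn' : isMatchA tn tc = true := by rw [← nextEnt_eq_isMatch]; simpa using hn
    have hkn : keyOf tn = some s := by
      have h := isMatch_eq_key tn tc s hs
      rw [hn'] at h; simpa using h.symm
    have hbuf : r.1 = (i, tc) :: (i + 1, tn) :: (takeRun (some s) (enumP (i + 2) ts)).1 := by
      show (extendA (i + 2) tn ts [(i, tc), (i + 1, tn)]).1 = _
      rw [extend_buf ts (i + 2) tn [(i, tc), (i + 1, tn)] s hkn]; rfl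
    rw [hbuf] at hlen
    simp at hlen

-- ===== VERDICT (by name: the statement is the Claim_ definition above) =====
theorem process_py_spec : Claim_equal_process_py := by
  intro tokens _
  unfold Spec_process_py process_py process_py_alt
  rw [loop_eq 0 tokens, findB]
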